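-- pv_equiv track=rewrite | github.com/Nir-David-Duani/lane-detection | src/enhancements/crosswalk_detection.py | detect_crosswalk
-- ===== SOURCE A (Python) =====
-- def detect_crosswalk(horizontal_lines, min_lines=2, min_bbox_width=50, min_bbox_height=30):
--     """
--     Decide if crosswalk exists.
--
--     Crosswalk is detected if:
--     - At least min_lines horizontal long lines found
--     - Bounding box meets minimum size requirements (if specified)
--
--     Args:
--         horizontal_lines: List of filtered horizontal line candidates
--         min_lines: Minimum number of lines required (default: 2)
--         min_bbox_width: Minimum bounding box width in pixels (default: 50)
--         min_bbox_height: Minimum bounding box height in pixels (default: 30)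
--
--     Returns:
--         bool: True if crosswalk detected, False otherwise
--     """
--     if len(horizontal_lines) < min_lines:
--         return False
--
--     # Check bounding box size requirements
--     # Calculate bounding box
--     all_x = []
--     all_y = []
--     for line in horizontal_lines:
--         x1, y1, x2, y2 = line
--         all_x.extend([x1, x2])
--         all_y.extend([y1, y2])
--
--     bbox_width = max(all_x) - min(all_x) if all_x else 0
--     bbox_height = max(all_y) - min(all_y) if all_y else 0
--
--     # Check minimum requirements
--     if bbox_width < min_bbox_width:
--         return False
--     if bbox_height < min_bbox_height:
--         return False
--
--     return True
-- ===== SOURCE B (Python) =====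
-- def detect_crosswalk(horizontal_lines, min_lines=2, min_bbox_width=50, min_bbox_height=30):
--     """Single-pass variant: running extrema instead of building coordinate lists."""
--     if len(horizontal_lines) < min_lines:
--         return False
--     seen = False
--     min_x = max_x = min_y = max_y = 0
--     for x1, y1, x2, y2 in horizontal_lines:
--         if not seen:
--             min_x = min(x1, x2)
--             max_x = max(x1, x2)
--             min_y = min(y1, y2)
--             max_y = max(y1, y2)
--             seen = True
--         else:
--             min_x = min(min_x, x1, x2)
--             max_x = max(max_x, x1, x2)
--             min_y = min(min_y, y1, y2)
--             max_y = max(max_y, y1, y2)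
--     bbox_width = max_x - min_x if seen else 0
--     bbox_height = max_y - min_y if seen else 0
--     return bbox_width >= min_bbox_width and bbox_height >= min_bbox_height
-- ===== Notes on version B (the rewrite author's own statement) =====
-- stated objective: simpler
-- what changed: Replaces the build of two coordinate lists followed by four separate max/min reductions with one pass that maintains running min_x/max_x/min_y/max_y (an Option state in the port), computing the bounding box without materialising any list.
import Mathlib
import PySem

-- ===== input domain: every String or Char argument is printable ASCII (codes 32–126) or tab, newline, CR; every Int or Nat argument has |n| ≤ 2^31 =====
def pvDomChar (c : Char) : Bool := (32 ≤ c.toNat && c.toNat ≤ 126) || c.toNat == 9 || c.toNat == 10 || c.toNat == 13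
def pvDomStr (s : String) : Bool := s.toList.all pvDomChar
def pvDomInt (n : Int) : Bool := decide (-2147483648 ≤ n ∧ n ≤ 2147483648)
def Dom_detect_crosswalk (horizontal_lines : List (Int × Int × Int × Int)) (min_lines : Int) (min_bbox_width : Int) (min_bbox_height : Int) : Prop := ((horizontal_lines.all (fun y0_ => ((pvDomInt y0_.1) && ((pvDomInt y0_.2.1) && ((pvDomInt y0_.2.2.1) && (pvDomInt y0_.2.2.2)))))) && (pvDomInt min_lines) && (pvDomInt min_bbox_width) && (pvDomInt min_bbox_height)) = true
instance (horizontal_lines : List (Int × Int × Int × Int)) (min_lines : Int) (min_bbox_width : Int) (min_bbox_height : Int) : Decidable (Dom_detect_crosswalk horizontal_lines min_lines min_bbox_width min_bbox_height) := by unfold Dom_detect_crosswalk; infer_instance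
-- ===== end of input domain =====

-- B computes the bounding box in one pass with running extrema instead of building
-- two coordinate lists and reducing each twice (objective: simpler, O(1) extra space).


-- ===== PORT A =====
-- loop building all_x / all_y by repeated extend, then max/min reductions
def detect_crosswalk (horizontal_lines : List (Int × Int × Int × Int)) (min_lines : Int) (min_bbox_width : Int) (min_bbox_height : Int) : Bool :=
  if (horizontal_lines.length : Int) < min_lines then false
  else
    let acc := horizontal_lines.foldl
      (fun (acc : List Int × List Int) l =>
        (acc.1 ++ [l.1, l.2.2.1], acc.2 ++ [l.2.1, l.2.2.2])) ([], [])
    let all_x := acc.1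
    let all_y := acc.2
    let bbox_width := if all_x ≠ [] then
        (PySem.List.max? all_x (fun v => v)).getD 0 - (PySem.List.min? all_x (fun v => v)).getD 0
      else 0
    let bbox_height := if all_y ≠ [] then
        (PySem.List.max? all_y (fun v => v)).getD 0 - (PySem.List.min? all_y (fun v => v)).getD 0
      else 0
    if bbox_width < min_bbox_width then false
    else if bbox_height < min_bbox_height then false
    else true

-- ===== PORT B =====
-- state: none = no point seen yet; some (min_x, max_x, min_y, max_y)
def bboxStep (s : Option (Int × Int × Int × Int)) (l : Int × Int × Int × Int) :
    Option (Int × Int × Int × Int) :=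
  match l with
  | (x1, y1, x2, y2) =>
    match s with
    | none => some (min x1 x2, max x1 x2, min y1 y2, max y1 y2)
    | some (mnx, mxx, mny, mxy) =>
      some (min (min mnx x1) x2, max (max mxx x1) x2,
            min (min mny y1) y2, max (max mxy y1) y2)

def detect_crosswalk_alt (horizontal_lines : List (Int × Int × Int × Int)) (min_lines : Int) (min_bbox_width : Int) (min_bbox_height : Int) : Bool :=
  if (horizontal_lines.length : Int) < min_lines then false
  else
    let wh : Int × Int :=
      match horizontal_lines.foldl bboxStep none with
      | none => (0, 0)
      | some (mnx, mxx, mny, mxy) => (mxx - mnx, mxy - mny)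
    decide (min_bbox_width ≤ wh.1) && decide (min_bbox_height ≤ wh.2)

-- ===== PRECONDITION & SPEC =====
def Spec_detect_crosswalk (horizontal_lines : List (Int × Int × Int × Int)) (min_lines : Int) (min_bbox_width : Int) (min_bbox_height : Int) (out : Bool) : Prop := out = detect_crosswalk_alt horizontal_lines min_lines min_bbox_width min_bbox_height
instance (horizontal_lines : List (Int × Int × Int × Int)) (min_lines : Int) (min_bbox_width : Int) (min_bbox_height : Int) (out : Bool) : Decidable (Spec_detect_crosswalk horizontal_lines min_lines min_bbox_width min_bbox_height out) := by unfold Spec_detect_crosswalk; infer_instance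

-- ===== CLAIM (what is proved, stated in full; the proofs are below) =====
def Claim_equal_detect_crosswalk : Prop := ∀ (horizontal_lines : List (Int × Int × Int × Int)) (min_lines : Int) (min_bbox_width : Int) (min_bbox_height : Int), Dom_detect_crosswalk horizontal_lines min_lines min_bbox_width min_bbox_height → Spec_detect_crosswalk horizontal_lines min_lines min_bbox_width min_bbox_height (detect_crosswalk horizontal_lines min_lines min_bbox_width min_bbox_height)

-- ===== LEMMAS AND PROOFS =====

-- flat coordinate lists (proof-side characterisation of A's accumulation loop)
def flatX (lines : List (Int × Int × Int × Int)) : List Int :=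
  lines.flatMap (fun l => [l.1, l.2.2.1])
def flatY (lines : List (Int × Int × Int × Int)) : List Int :=
  lines.flatMap (fun l => [l.2.1, l.2.2.2])

theorem accA_eq (lines : List (Int × Int × Int × Int)) : ∀ (ax ay : List Int),
    lines.foldl (fun (acc : List Int × List Int) l =>
        (acc.1 ++ [l.1, l.2.2.1], acc.2 ++ [l.2.1, l.2.2.2])) (ax, ay)
      = (ax ++ flatX lines, ay ++ flatY lines) := by
  induction lines with
  | nil => intro ax ay; simp [flatX, flatY]
  | cons h t ih => intro ax ay; simp [List.foldl, ih, flatX, flatY, List.flatMap_cons]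

theorem foldB_some (lines : List (Int × Int × Int × Int)) :
    ∀ (a b c d : Int),
    lines.foldl bboxStep (some (a, b, c, d))
      = some ((flatX lines).foldl min a, (flatX lines).foldl max b,
              (flatY lines).foldl min c, (flatY lines).foldl max d) := by
  induction lines with
  | nil => intro a b c d; simp [flatX, flatY]
  | cons h t ih =>
    intro a b c d
    obtain ⟨x1, y1, x2, y2⟩ := h
    simp [List.foldl, bboxStep, ih, flatX, flatY, List.flatMap_cons]

theorem detect_crosswalk_spec_aux (horizontal_lines : List (Int × Int × Int × Int))
    (min_lines min_bbox_width min_bbox_height : Int) :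
    detect_crosswalk horizontal_lines min_lines min_bbox_width min_bbox_height
      = detect_crosswalk_alt horizontal_lines min_lines min_bbox_width min_bbox_height := by
  unfold detect_crosswalk detect_crosswalk_alt
  by_cases hlen : (horizontal_lines.length : Int) < min_lines
  · simp [hlen]
  · simp only [hlen, if_false]
    cases horizontal_lines with
    | nil =>
      by_cases h1 : (0:Int) < min_bbox_width <;> by_cases h2 : (0:Int) < min_bbox_height <;>
        simp [h1, h2] <;> omega
    | cons h t =>
      obtain ⟨x1, y1, x2, y2⟩ := h
      rw [show (([], []) : List Int × List Int) = (([] : List Int), ([] : List Int)) from rfl,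
          accA_eq]
      simp only [List.nil_append, List.foldl, bboxStep, foldB_some,
        flatX, flatY, List.flatMap_cons, List.cons_append, List.nil_append]
      rw [PySem.List.max?_id_cons, PySem.List.min?_id_cons,
          PySem.List.max?_id_cons, PySem.List.min?_id_cons]
      simp only [List.foldl, ne_eq, reduceCtorEq, not_false_eq_true, if_true,
        Option.getD_some]
      by_cases hw : (List.flatMap (fun l => [l.1, l.2.2.1]) t).foldl max (max x1 x2) -
          (List.flatMap (fun l => [l.1, l.2.2.1]) t).foldl min (min x1 x2) < min_bbox_width <;>
        by_cases hh : (List.flatMap (fun l => [l.2.1, l.2.2.2]) t).foldl max (max y1 y2) -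
          (List.flatMap (fun l => [l.2.1, l.2.2.2]) t).foldl min (min y1 y2) < min_bbox_height <;>
        simp [hw, hh] <;> omega

-- ===== VERDICT (by name: the statement is the Claim_ definition above) =====
theorem detect_crosswalk_spec : Claim_equal_detect_crosswalk := by
  intro hl ml mw mh _
  exact detect_crosswalk_spec_aux hl ml mw mh
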